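-- pv_equiv track=rewrite | github.com/Pratyashshrivastava/DSA | SlidingWindow/stringofminlen.py | minLen
-- ===== SOURCE A (Python) =====
-- from collections import Counter
--
-- def minLen(s):
--     charCount = Counter(s)
--     frequencies = list(charCount.values())
--     frequencies.sort(reverse=True)
--     removals = 0
--     for i in range(min(3,len(frequencies))):
--         removals+=frequencies[i]
--     return len(s)-removals
-- ===== SOURCE B (Python) =====
-- def minLen(s):
--     counts = {}
--     for ch in s:
--         counts[ch] = counts.get(ch, 0) + 1
--     vals = list(counts.values())
--     removals = 0
--     for _ in range(min(3, len(vals))):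
--         m = max(vals)
--         vals.remove(m)
--         removals += m
--     return len(s) - removals
-- ===== Notes on version B (the rewrite author's own statement) =====
-- stated objective: alternative
-- what changed: B builds the counts with a plain dict loop and, instead of sorting all frequencies, repeats min(3, distinct) linear max-scans, removing each maximum from the value list.
import Mathlib
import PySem

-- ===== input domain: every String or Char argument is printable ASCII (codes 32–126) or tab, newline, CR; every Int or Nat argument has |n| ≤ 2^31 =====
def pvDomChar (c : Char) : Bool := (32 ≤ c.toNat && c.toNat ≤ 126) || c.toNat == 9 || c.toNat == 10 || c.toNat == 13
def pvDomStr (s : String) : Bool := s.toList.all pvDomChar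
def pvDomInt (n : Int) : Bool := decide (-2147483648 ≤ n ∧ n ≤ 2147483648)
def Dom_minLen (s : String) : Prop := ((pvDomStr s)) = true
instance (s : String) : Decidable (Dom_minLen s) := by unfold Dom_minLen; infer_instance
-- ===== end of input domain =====

-- B: builds counts with a plain dict loop and repeats min(3, distinct) linear max-scans
-- instead of one full sort — alternative decomposition, same exact result.

-- ===== PORT A =====
def minLen (s : String) : Int :=
  let charCount := PySem.Dict.counter s.toList
  let frequencies := PySem.List.sorted charCount.values (fun x => x) true
  let removals := (PySem.List.pyRange 0 (min 3 (PySem.List.len frequencies)) 1).foldl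
      (fun acc i => acc + PySem.List.pyGetD frequencies i 0) 0
  PySem.Str.len s - removals

-- ===== PORT B =====
-- the loop `for _ in range(k): m = max(vals); vals.remove(m); removals += m`
def minLenAltLoop : Nat → List Int → Int → Int
  | 0, _, removals => removals
  | k+1, vals, removals =>
    match PySem.List.max? vals (fun x => x) with
    | none => removals          -- unreachable: the loop runs at most len(vals) times
    | some m =>
      match PySem.List.remove? vals m with
      | none => removals        -- unreachable: m ∈ vals
      | some vals' => minLenAltLoop k vals' (removals + m)

def minLen_alt (s : String) : Int :=
  let counts := s.toList.foldl (fun d c => d.insert c (d.getD c 0 + 1)) PySem.Dict.empty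
  let vals := counts.values
  PySem.Str.len s - minLenAltLoop (min 3 vals.length) vals 0

-- ===== PRECONDITION & SPEC =====
def Spec_minLen (s : String) (out : Int) : Prop := out = minLen_alt s
instance (s : String) (out : Int) : Decidable (Spec_minLen s out) := by unfold Spec_minLen; infer_instance

-- ===== CLAIM (what is proved, stated in full; the proofs are below) =====
def Claim_equal_minLen : Prop := ∀ (s : String), Dom_minLen s → Spec_minLen s (minLen s)

-- ===== LEMMAS AND PROOFS =====

-- A's indexed range-loop over the first n entries is the sum of `take n`
theorem minLen_rangeSum (l : List Int) (n : Nat) (h : n ≤ l.length) :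
    (PySem.List.pyRange 0 (n : Int) 1).foldl (fun acc i => acc + PySem.List.pyGetD l i 0) 0
      = (l.take n).sum := by
  induction n with
  | zero => simp [PySem.List.pyRange]
  | succ n ih =>
    have h' : n ≤ l.length := Nat.le_of_succ_le h
    have hr : PySem.List.pyRange 0 ((n+1 : Nat) : Int) 1
        = PySem.List.pyRange 0 (n : Int) 1 ++ [(n : Int)] := by
      have := PySem.List.pyRange_one_succ_right (a := 0) (b := (n : Int)) (by positivity)
      simpa using this
    have hn : n < l.length := h
    rw [hr, List.foldl_append, ih h']
    have hget : PySem.List.pyGetD l (n : Int) 0 = l[n] := by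
      rw [PySem.List.pyGetD_natCast]
      simp [List.getD, hn]
    simp only [List.foldl_cons, List.foldl_nil, hget]
    rw [List.sum_take_succ l n hn]

-- B's repeated max-extraction is the sum of the first k entries of the descending sort
theorem minLen_extract (k : Nat) (vals : List Int) (r : Int) :
    minLenAltLoop k vals r
      = r + ((PySem.List.sorted vals (fun x => x) true).take k).sum := by
  induction k generalizing vals r with
  | zero => simp [minLenAltLoop]
  | succ k ih =>
    rcases hv : vals with _ | ⟨x, xs⟩
    · simp [minLenAltLoop, PySem.List.max?, PySem.List.sorted]
    rw [← hv]
    have hvne : vals ≠ [] := by simp [hv]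
    obtain ⟨m, hm⟩ : ∃ m, PySem.List.max? vals (fun x => x) = some m := by
      rcases hmx : PySem.List.max? vals (fun x => x) with _ | m
      · exact absurd ((PySem.List.max?_eq_none_iff vals (fun x => x)).mp hmx) hvne
      · exact ⟨m, rfl⟩
    have hmem : m ∈ vals := PySem.List.max?_mem hm
    have hmax : ∀ y ∈ vals, y ≤ m := PySem.List.max?_isMax hm
    obtain ⟨h, t, hs⟩ : ∃ h t, PySem.List.sorted vals (fun x => x) true = h :: t := by
      rcases hso : PySem.List.sorted vals (fun x => x) true with _ | ⟨h, t⟩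
      · exact absurd ((PySem.List.sorted_eq_nil_iff vals (fun x => x) true).mp hso) hvne
      · exact ⟨h, t, rfl⟩
    have hperm : (PySem.List.sorted vals (fun x => x) true).Perm vals :=
      PySem.List.sorted_perm ..
    have hhm : h = m := by
      have h1 : h ≤ m := hmax h (hperm.mem_iff.mp (by simp [hs]))
      have h2 : m ≤ h := PySem.List.key_head_sorted_rev_ge vals (fun x => x) hs m hmem
      omega
    have hrm : PySem.List.remove? vals m = some (vals.erase m) :=
      PySem.List.remove?_eq_some_erase vals m hmem
    have hloop : minLenAltLoop (k+1) vals r = minLenAltLoop k (vals.erase m) (r + m) := by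
      simp [minLenAltLoop, hm, hrm]
    rw [hloop, ih]
    -- the tail t is the descending sort of vals.erase m
    have htperm : t.Perm (vals.erase m) := by
      have h2 := hperm.erase h
      rw [hs] at h2
      simpa [hhm] using h2
    have hsorted2 : (PySem.List.sorted (vals.erase m) (fun x => x) true).Perm t :=
      (PySem.List.sorted_perm ..).trans htperm.symm
    have hpw : (PySem.List.sorted vals (fun x => x) true).Pairwise (fun a b => b ≤ a) :=
      PySem.List.sorted_pairwise_rev ..
    have hpwt : t.Pairwise (fun a b : Int => b ≤ a) := by
      rw [hs] at hpw; exact hpw.tail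
    have hpw2 : (PySem.List.sorted (vals.erase m) (fun x => x) true).Pairwise
        (fun a b : Int => b ≤ a) := PySem.List.sorted_pairwise_rev ..
    have heq : PySem.List.sorted (vals.erase m) (fun x => x) true = t :=
      hsorted2.eq_of_pairwise (fun a b _ _ hab hba => le_antisymm hba hab) hpw2 hpwt
    rw [heq, hs, hhm, List.take_succ_cons, List.sum_cons]
    ring

-- ===== VERDICT (by name: the statement is the Claim_ definition above) =====
theorem minLen_spec : Claim_equal_minLen := by
  intro s _
  unfold Spec_minLen
  simp only [minLen, minLen_alt, PySem.Dict.foldl_insert_getD_add_one_eq_counter]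
  set vals := (PySem.Dict.counter s.toList).values with hvals
  set srt := PySem.List.sorted vals (fun x => x) true with hsrt
  have hlen : srt.length = vals.length := PySem.List.length_sorted ..
  have hmin : min 3 (PySem.List.len srt) = ((min 3 vals.length : Nat) : Int) := by
    simp [PySem.List.len, hlen]
  have hle : min 3 vals.length ≤ srt.length := by omega
  rw [hmin, minLen_rangeSum srt _ hle, minLen_extract]
  rw [hsrt]
  omega
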